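-- pv_equiv track=rewrite | github.com/zhangSchnee/DulE2.0-RE | bojone/new_post_process.py | cal_dis
-- ===== SOURCE A (Python) =====
-- def cal_dis(object_value,item,text):
--     total_len  = len(text)
--     len1 = len(object_value)
--     len2 = len(item)
--     item_index = 0
--     o_index = 0
--     for i in range(total_len):
--         if text[i:i+len2] == item:
--             item_index = i
--             break
--     for i in range(total_len):
--         if text[i:i+len1] == object_value:
--             o_index = i
--             break
--     o_index = o_index
--     item_index = item_index +len2+1
--     return abs(o_index-item_index)
-- ===== SOURCE B (Python) =====
-- def _rk_find(text, pat):
--     """Rabin-Karp: rolling-hash scan, verifying on hash hit; returns the index of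
--     the first occurrence of pat in text, or 0 when absent (matching A's default)."""
--     n, m = len(text), len(pat)
--     if m == 0:
--         return 0
--     if m > n:
--         return 0
--     B = 257
--     M = (1 << 61) - 1
--     hp = 0
--     for c in pat:
--         hp = (hp * B + ord(c)) % M
--     ht = 0
--     for c in text[:m]:
--         ht = (ht * B + ord(c)) % M
--     power = pow(B, m - 1, M)
--     i = 0
--     while True:
--         if ht == hp and text[i:i + m] == pat:
--             return i
--         if i + m >= n:
--             return 0
--         ht = ((ht - ord(text[i]) * power) * B + ord(text[i + m])) % M
--         i += 1
--
-- def cal_dis(object_value, item, text):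
--     item_index = _rk_find(text, item)
--     o_index = _rk_find(text, object_value)
--     return abs(o_index - (item_index + len(item) + 1))
-- ===== Notes on version B (the rewrite author's own statement) =====
-- stated objective: faster
-- what changed: Replaces A's two break-scans that re-slice and compare text[i:i+m] at every position (O(n*m)) with a Rabin-Karp rolling-hash search (hash each window in O(1), compare slices only on a hash hit), mapping not-found to index 0 exactly as A's untouched default.
import Mathlib
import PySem

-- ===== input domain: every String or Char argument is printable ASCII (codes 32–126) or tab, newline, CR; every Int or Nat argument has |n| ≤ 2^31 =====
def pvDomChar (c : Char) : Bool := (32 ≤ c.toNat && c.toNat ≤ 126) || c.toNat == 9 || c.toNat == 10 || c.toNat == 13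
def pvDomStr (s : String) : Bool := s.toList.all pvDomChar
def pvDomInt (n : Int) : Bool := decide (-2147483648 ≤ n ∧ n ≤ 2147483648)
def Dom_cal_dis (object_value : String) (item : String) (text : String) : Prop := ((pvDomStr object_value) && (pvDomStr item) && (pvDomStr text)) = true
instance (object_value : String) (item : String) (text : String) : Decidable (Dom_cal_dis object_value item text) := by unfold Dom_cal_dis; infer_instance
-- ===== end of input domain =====

-- B replaces A's two quadratic slice-scanning loops with a Rabin-Karp rolling-hash search
-- (verify on hash hit; not-found maps to 0 exactly as A's untouched default).


-- ===== PORT A =====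
-- 'for i in range(total_len): if text[i:i+len(pat)] == pat: idx = i; break' with idx initialised to 0:
def pvFirst (t pat : List Char) : List Nat → Nat
  | [] => 0
  | i :: rest =>
    if PySem.List.slice t (some (i : Int)) (some ((i : Int) + (pat.length : Int))) = pat then i
    else pvFirst t pat rest

def cal_dis (object_value : String) (item : String) (text : String) : Int :=
  let t := text.toList
  let total_len := t.length
  let len2 := item.toList.length  -- len1 of A is pat.length inside the object_value scan
  let item_index := pvFirst t item.toList (List.range total_len)
  let o_index := pvFirst t object_value.toList (List.range total_len)
  let item_index' : Int := (item_index : Int) + (len2 : Int) + 1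
  |((o_index : Int) - item_index')|

-- ===== PORT B =====  (Source B: Rabin-Karp _rk_find, then the distance formula)
def rkM : Int := 2305843009213693951   -- (1 << 61) - 1

-- 'for c in l: h = (h*257 + ord(c)) % M' as a foldl
def rkHash (l : List Char) : Int :=
  l.foldl (fun h c => PySem.Int.mod (h * 257 + (c.toNat : Int)) rkM) 0

-- the 'while True' loop; fuel = n - m - i counts the remaining shifts, so fuel = 0 is 'i + m >= n'.
-- text[i] / text[i+m] are in range whenever read, so the pyGetD default ' ' is never used.
def rkLoop (t pat : List Char) (hp power : Int) (m : Nat) : Nat → Int → Nat → Nat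
  | 0, ht, i =>
    if ht = hp ∧ PySem.List.slice t (some (i : Int)) (some ((i : Int) + (m : Int))) = pat then i
    else 0
  | fuel + 1, ht, i =>
    if ht = hp ∧ PySem.List.slice t (some (i : Int)) (some ((i : Int) + (m : Int))) = pat then i
    else
      rkLoop t pat hp power m fuel
        (PySem.Int.mod ((ht - ((PySem.List.pyGetD t (i : Int) ' ').toNat : Int) * power) * 257
          + ((PySem.List.pyGetD t ((i : Int) + (m : Int)) ' ').toNat : Int)) rkM)
        (i + 1)

def rkFind (t pat : List Char) : Nat :=
  let n := t.length
  let m := pat.length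
  if m = 0 then 0
  else if n < m then 0
  else
    let hp := rkHash pat
    let ht := rkHash (PySem.List.slice t none (some (m : Int)))
    let power := PySem.Int.powMod 257 (m - 1) rkM
    rkLoop t pat hp power m (n - m) ht 0

def cal_dis_alt (object_value : String) (item : String) (text : String) : Int :=
  let item_index := rkFind text.toList item.toList
  let o_index := rkFind text.toList object_value.toList
  |((o_index : Int) - ((item_index : Int) + (item.toList.length : Int) + 1))|

-- ===== PRECONDITION & SPEC =====
def Spec_cal_dis (object_value : String) (item : String) (text : String) (out : Int) : Prop := out = cal_dis_alt object_value item text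
instance (object_value : String) (item : String) (text : String) (out : Int) : Decidable (Spec_cal_dis object_value item text out) := by unfold Spec_cal_dis; infer_instance

-- ===== CLAIM (what is proved, stated in full; the proofs are below) =====
def Claim_equal_cal_dis : Prop := ∀ (object_value : String) (item : String) (text : String), Dom_cal_dis object_value item text → Spec_cal_dis object_value item text (cal_dis object_value item text)

-- ===== LEMMAS AND PROOFS =====

theorem rkM_pos : (0 : Int) < rkM := by norm_num [rkM]

-- proof-side: the hash WITHOUT the modulus
def pvH0 (l : List Char) (h : Int) : Int :=
  l.foldl (fun h c => h * 257 + (c.toNat : Int)) h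

theorem pvH0_cons (c : Char) (l : List Char) (h : Int) :
    pvH0 (c :: l) h = pvH0 l (h * 257 + (c.toNat : Int)) := rfl

theorem pvH0_shift (l : List Char) (h : Int) :
    pvH0 l h = h * 257 ^ l.length + pvH0 l 0 := by
  induction l generalizing h with
  | nil => simp [pvH0]
  | cons c l ih =>
    rw [pvH0_cons, pvH0_cons, ih (h * 257 + (c.toNat : Int)), ih ((0 : Int) * 257 + (c.toNat : Int)),
      List.length_cons, pow_succ]
    ring

theorem pvH0_append_singleton (l : List Char) (d : Char) (h : Int) :
    pvH0 (l ++ [d]) h = pvH0 l h * 257 + (d.toNat : Int) := by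
  simp [pvH0, List.foldl_append]

-- the modded fold is the unmodded fold taken mod rkM
theorem rkHash_mod (l : List Char) : ∀ (h h' : Int), h' = h % rkM →
    l.foldl (fun h c => PySem.Int.mod (h * 257 + (c.toNat : Int)) rkM) h' = pvH0 l h % rkM := by
  induction l with
  | nil => intro h h' hh; simpa [pvH0] using hh
  | cons c l ih =>
    intro h h' hh
    rw [List.foldl_cons, pvH0_cons]
    apply ih
    rw [PySem.Int.mod_eq_emod_of_pos rkM_pos, hh]
    conv_lhs => rw [Int.add_emod, Int.mul_emod, Int.emod_emod_of_dvd h dvd_rfl, ← Int.mul_emod, ← Int.add_emod]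

theorem rkHash_eq_H0_mod (l : List Char) : rkHash l = pvH0 l 0 % rkM :=
  rkHash_mod l 0 0 (by simp)

-- THE rolling-hash step: sliding the window one to the right
theorem rkRoll (c0 cm : Char) (rest : List Char) (e : Nat) (he : e = rest.length) :
    PySem.Int.mod ((rkHash (c0 :: rest) - ((c0.toNat : Int)) * PySem.Int.powMod 257 e rkM) * 257
      + (cm.toNat : Int)) rkM = rkHash (rest ++ [cm]) := by
  subst he
  rw [PySem.Int.mod_eq_emod_of_pos rkM_pos, PySem.Int.powMod_eq_emod 257 rest.length rkM_pos,
    rkHash_eq_H0_mod, rkHash_eq_H0_mod, pvH0_append_singleton]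
  have hA : pvH0 (c0 :: rest) 0 = (c0.toNat : Int) * 257 ^ rest.length + pvH0 rest 0 := by
    rw [pvH0_cons, pvH0_shift]; ring
  have h1 : (pvH0 (c0 :: rest) 0 % rkM) ≡ pvH0 (c0 :: rest) 0 [ZMOD rkM] :=
    Int.emod_emod_of_dvd _ dvd_rfl
  have h2 : ((257 : Int) ^ rest.length % rkM) ≡ (257 : Int) ^ rest.length [ZMOD rkM] :=
    Int.emod_emod_of_dvd _ dvd_rfl
  have h3 : ((pvH0 (c0 :: rest) 0 % rkM - (c0.toNat : Int) * ((257 : Int) ^ rest.length % rkM)) * 257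
      + (cm.toNat : Int))
      ≡ ((pvH0 (c0 :: rest) 0 - (c0.toNat : Int) * (257 : Int) ^ rest.length) * 257 + (cm.toNat : Int))
      [ZMOD rkM] :=
    ((h1.sub ((Int.ModEq.refl _).mul h2)).mul_right 257).add_right _
  have h4 : pvH0 (c0 :: rest) 0 - (c0.toNat : Int) * (257 : Int) ^ rest.length = pvH0 rest 0 := by
    rw [hA]; ring
  exact h4 ▸ h3

theorem pvFirst_no_match (t pat : List Char) (l : List Nat)
    (h : ∀ i ∈ l, PySem.List.slice t (some (i : Int)) (some ((i : Int) + (pat.length : Int))) ≠ pat) :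
    pvFirst t pat l = 0 := by
  induction l with
  | nil => rfl
  | cons i rest ih =>
    simp only [pvFirst]
    rw [if_neg (h i (List.mem_cons_self))]
    exact ih (fun j hj => h j (List.mem_cons_of_mem _ hj))

theorem pvFirst_append_no_match (t pat : List Char) (l1 l2 : List Nat)
    (h : ∀ i ∈ l2, PySem.List.slice t (some (i : Int)) (some ((i : Int) + (pat.length : Int))) ≠ pat) :
    pvFirst t pat (l1 ++ l2) = pvFirst t pat l1 := by
  induction l1 with
  | nil => simpa using pvFirst_no_match t pat l2 h
  | cons i rest ih =>
    simp only [List.cons_append, pvFirst]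
    split_ifs
    · rfl
    · exact ih

-- a slice at a position with fewer than pat.length characters left never equals pat
theorem slice_short_ne (t pat : List Char) (i : Nat) (hi : t.length < i + pat.length) (hp : pat ≠ []) :
    PySem.List.slice t (some (i : Int)) (some ((i : Int) + (pat.length : Int))) ≠ pat := by
  intro hc
  rw [PySem.List.slice_natCast_add] at hc
  have := congrArg List.length hc
  simp only [List.length_take, List.length_drop] at this
  have : pat.length ≠ 0 := fun h => hp (List.eq_nil_of_length_eq_zero h)
  omega

-- the loop, under the hash invariant, is exactly A's break-scan over the remaining positions
theorem rkLoop_eq (t pat : List Char) (m : Nat) (hm : m = pat.length) (hm0 : m ≠ 0) :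
    ∀ (fuel i : Nat) (ht : Int), i + m + fuel = t.length →
      ht = rkHash ((t.drop i).take m) →
      rkLoop t pat (rkHash pat) (PySem.Int.powMod 257 (m - 1) rkM) m fuel ht i
        = pvFirst t pat (List.range' i (fuel + 1)) := by
  subst hm
  intro fuel
  induction fuel with
  | zero =>
    intro i ht hlen hinv
    rw [List.range'_one]
    simp only [rkLoop, pvFirst]
    by_cases hs : PySem.List.slice t (some (i : Int)) (some ((i : Int) + (pat.length : Int))) = pat
    · rw [if_pos ⟨by rw [hinv]; congr 1; conv_rhs => rw [← hs, PySem.List.slice_natCast_add], hs⟩,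
        if_pos hs]
    · rw [if_neg (by rintro ⟨-, h⟩; exact hs h), if_neg hs]
  | succ fuel ih =>
    intro i ht hlen hinv
    rw [List.range'_succ]
    simp only [rkLoop, pvFirst]
    by_cases hs : PySem.List.slice t (some (i : Int)) (some ((i : Int) + (pat.length : Int))) = pat
    · rw [if_pos ⟨by rw [hinv]; congr 1; conv_rhs => rw [← hs, PySem.List.slice_natCast_add], hs⟩,
        if_pos hs]
    · rw [if_neg (by rintro ⟨-, h⟩; exact hs h), if_neg hs]
      have hi : i < t.length := by omega
      have him : i + pat.length < t.length := by omega
      apply ih (i + 1) _ (by omega)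
      -- the rolling update preserves the invariant
      have hgi : PySem.List.pyGetD t (i : Int) ' ' = t[i] := by
        rw [PySem.List.pyGetD_natCast, List.getD_eq_getElem t ' ' hi]
      have hgm : PySem.List.pyGetD t ((i : Int) + (pat.length : Int)) ' ' = t[i + pat.length] := by
        have : ((i : Int) + (pat.length : Int)) = ((i + pat.length : Nat) : Int) := by push_cast; ring
        rw [this, PySem.List.pyGetD_natCast, List.getD_eq_getElem t ' ' him]
      obtain ⟨k, hk⟩ : ∃ k, pat.length = k + 1 := ⟨pat.length - 1, by omega⟩
      have hwin : (t.drop i).take pat.length = t[i] :: ((t.drop (i + 1)).take (pat.length - 1)) := by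
        rw [hk]
        simp only [Nat.add_sub_cancel]
        rw [List.drop_eq_getElem_cons hi, List.take_succ_cons]
      have hrestlen : ((t.drop (i + 1)).take (pat.length - 1)).length = pat.length - 1 := by
        simp [List.length_take, List.length_drop]; omega
      have hwin' : (t.drop (i + 1)).take pat.length
          = ((t.drop (i + 1)).take (pat.length - 1)) ++ [t[i + pat.length]] := by
        have hlt : pat.length - 1 < (t.drop (i + 1)).length := by
          simp [List.length_drop]; omega
        have hlt' : k < (t.drop (i + 1)).length := by omega
        have hel : (t.drop (i + 1))[k]'hlt' = t[i + pat.length] := by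
          rw [List.getElem_drop]
          congr 1
          omega
        have h9 : pat.length - 1 = k := by omega
        rw [h9]
        conv_lhs => rw [hk]
        rw [List.take_succ_eq_append_getElem hlt', hel]
      rw [hgi, hgm, hinv, hwin, hwin']
      exact rkRoll _ _ _ _ hrestlen.symm
-- the Rabin-Karp search returns exactly what A's break-scan returns
theorem rkFind_eq (t pat : List Char) : rkFind t pat = pvFirst t pat (List.range t.length) := by
  unfold rkFind
  by_cases hm : pat.length = 0
  · rw [if_pos hm]
    have hp : pat = [] := List.eq_nil_of_length_eq_zero hm
    subst hp
    cases ht : t.length with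
    | zero => simp [List.range_zero, pvFirst]
    | succ k =>
      rw [List.range_eq_range', List.range'_succ]
      simp only [pvFirst]
      rw [if_pos (by simpa using PySem.List.slice_natCast_add t 0 0)]
  · rw [if_neg hm]
    have hp : pat ≠ [] := fun h => hm (by simp [h])
    by_cases hn : t.length < pat.length
    · rw [if_pos hn]
      exact (pvFirst_no_match t pat _ (fun i _ => slice_short_ne t pat i (by omega) hp)).symm
    · rw [if_neg hn]
      have h0 : rkHash (PySem.List.slice t none (some (pat.length : Int)))
          = rkHash ((t.drop 0).take pat.length) := by
        rw [PySem.List.slice_to_natCast, List.drop_zero]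
      rw [rkLoop_eq t pat pat.length rfl hm (t.length - pat.length) 0 _ (by omega) h0]
      have hsplit : List.range t.length
          = List.range' 0 (t.length - pat.length + 1) ++ List.range' (t.length - pat.length + 1) (pat.length - 1) := by
        rw [List.range_eq_range']
        have := List.range'_append (s := 0) (m := t.length - pat.length + 1) (n := pat.length - 1) (step := 1)
        rw [show 0 + 1 * (t.length - pat.length + 1) = t.length - pat.length + 1 by omega] at this
        rw [this]
        congr 1
        omega
      rw [hsplit, pvFirst_append_no_match]
      intro i hi
      have : t.length - pat.length + 1 ≤ i := by
        have := List.mem_range'_1.mp hi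
        omega
      exact slice_short_ne t pat i (by omega) hp

-- ===== VERDICT (by name: the statement is the Claim_ definition above) =====
theorem cal_dis_spec : Claim_equal_cal_dis := by
  intro object_value item text _
  unfold Spec_cal_dis cal_dis cal_dis_alt
  rw [rkFind_eq, rkFind_eq]
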